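-- pv_equiv track=rewrite | github.com/HAAIL-Universe/AgentZero | challenges/C087_suffix_array/suffix_array.py | _classify_types
-- ===== SOURCE A (Python) =====
-- def _classify_types(s):
--     """Classify each suffix as S-type or L-type."""
--     n = len(s)
--     types = [''] * n
--     types[n - 1] = 'S'  # sentinel is S-type
--     for i in range(n - 2, -1, -1):
--         if s[i] > s[i + 1]:
--             types[i] = 'L'
--         elif s[i] < s[i + 1]:
--             types[i] = 'S'
--         else:
--             types[i] = types[i + 1]
--     return types
-- ===== SOURCE B (Python) =====
-- def _classify_types(s):
--     """Classify each suffix as S-type or L-type, one maximal run of equal chars at a time."""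
--     n = len(s)
--     types = []
--     i = 0
--     while i < n:
--         j = i + 1
--         while j < n and s[j] == s[i]:
--             j += 1
--         t = 'S' if j == n or s[i] < s[j] else 'L'
--         types += [t] * (j - i)
--         i = j
--     return types
-- ===== Notes on version B (the rewrite author's own statement) =====
-- stated objective: simpler
-- what changed: Replaces the right-to-left index loop over a preallocated array (with type propagation through equal characters) by a left-to-right recursion on maximal runs of equal characters, emitting each run's type at once.
import Mathlib
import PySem

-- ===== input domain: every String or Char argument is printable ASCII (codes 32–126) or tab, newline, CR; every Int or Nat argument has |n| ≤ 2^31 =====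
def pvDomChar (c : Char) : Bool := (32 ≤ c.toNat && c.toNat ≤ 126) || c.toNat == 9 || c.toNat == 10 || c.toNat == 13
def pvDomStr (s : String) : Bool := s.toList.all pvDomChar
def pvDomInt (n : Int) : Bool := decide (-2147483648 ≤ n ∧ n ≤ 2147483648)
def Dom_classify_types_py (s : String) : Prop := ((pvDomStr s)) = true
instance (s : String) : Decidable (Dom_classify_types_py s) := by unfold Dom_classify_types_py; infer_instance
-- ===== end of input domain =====

-- B replaces A's right-to-left index loop by a left-to-right recursion on maximal
-- runs of equal characters (simpler decomposition, same O(n) cost); A raises on ""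
-- (IndexError), which Pre_ excludes; B returns [] there.


-- ===== PORT A =====
-- types[n-1] = 'S', then for i in range(n-2, -1, -1) fill from the right.
def classify_types_py (s : String) : List String :=
  (PySem.List.pyRange ((s.toList.length : Int) - 2) (-1) (-1)).foldl
    (fun ts i =>
      if PySem.List.pyGetD s.toList i ' ' > PySem.List.pyGetD s.toList (i + 1) ' ' then ts.set i.toNat "L"
      else if PySem.List.pyGetD s.toList i ' ' < PySem.List.pyGetD s.toList (i + 1) ' ' then ts.set i.toNat "S"
      else ts.set i.toNat (PySem.List.pyGetD ts (i + 1) ""))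
    ((List.replicate s.toList.length "").set (s.toList.length - 1) "S")

-- ===== PORT B =====
-- Source B's outer while consumes one maximal run per iteration: here each recursive step
-- consumes one run (inner while 'j += 1' = takeWhile/dropWhile of chars equal to the head).
def classifyB_go : List Char → List String
  | [] => []
  | c :: rest =>
    let rest' := rest.dropWhile (· == c)
    let t : String := match rest' with
      | [] => "S"
      | d :: _ => if c < d then "S" else "L"
    List.replicate ((rest.takeWhile (· == c)).length + 1) t ++ classifyB_go rest'
termination_by cs => cs.length
decreasing_by
  exact Nat.lt_succ_of_le (List.Sublist.length_le (List.dropWhile_sublist _))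

def classify_types_py_alt (s : String) : List String := classifyB_go s.toList

-- ===== PRECONDITION & SPEC =====
-- Pre_ excludes exactly the empty string, on which A raises IndexError (types[-1] on an empty list).
def Pre_classify_types_py (s : String) : Prop := s ≠ ""
instance (s : String) : Decidable (Pre_classify_types_py s) := by unfold Pre_classify_types_py; infer_instance
def pvWitness_classify_types_py : String := "banana"

def Spec_classify_types_py (s : String) (out : List String) : Prop := out = classify_types_py_alt s
instance (s : String) (out : List String) : Decidable (Spec_classify_types_py s out) := by unfold Spec_classify_types_py; infer_instance

-- ===== CLAIM (what is proved, stated in full; the proofs are below) =====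
def Claim_equal_classify_types_py : Prop := ∀ (s : String), Dom_classify_types_py s → Pre_classify_types_py s → Spec_classify_types_py s (classify_types_py s)

-- ===== LEMMAS AND PROOFS =====

-- Reference characterisation: the right-to-left recursion both programs compute.
def typesRef : List Char → List String
  | [] => []
  | [_] => ["S"]
  | a :: b :: t =>
    let r := typesRef (b :: t)
    (if a > b then "L" else if a < b then "S" else r.headD "") :: r

lemma typesRef_length : ∀ cs : List Char, (typesRef cs).length = cs.length := by
  intro cs
  induction cs using typesRef.induct <;> simp [typesRef, *]

lemma set_replicate_append {α : Type} (x v : α) :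
    ∀ (m : Nat) (T : List α), (List.replicate (m + 1) x ++ T).set m v = List.replicate m x ++ v :: T := by
  intro m
  induction m with
  | zero => intro T; simp
  | succ k ih =>
    intro T
    rw [show List.replicate (k + 1 + 1) x = x :: List.replicate (k + 1) x from List.replicate_succ ..,
        List.cons_append, List.set_cons_succ, ih]
    simp [List.replicate_succ]

lemma loopA_inv (cs : List Char) :
    ∀ m : Nat, m + 1 ≤ cs.length →
    (PySem.List.pyRange ((m : Int) - 1) (-1) (-1)).foldl
      (fun ts i =>
        if PySem.List.pyGetD cs i ' ' > PySem.List.pyGetD cs (i + 1) ' ' then ts.set i.toNat "L"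
        else if PySem.List.pyGetD cs i ' ' < PySem.List.pyGetD cs (i + 1) ' ' then ts.set i.toNat "S"
        else ts.set i.toNat (PySem.List.pyGetD ts (i + 1) ""))
      (List.replicate m "" ++ typesRef (cs.drop m)) = typesRef cs := by
  intro m
  induction m with
  | zero =>
    intro _
    rw [PySem.List.pyRange_neg_one_eq_nil (by omega)]
    simp
  | succ k ih =>
    intro hm
    rw [show ((k + 1 : Nat) : Int) - 1 = (k : Int) by push_cast; ring,
        PySem.List.pyRange_neg_one_cons (by omega), List.foldl_cons]
    have hk1 : k + 1 < cs.length := by omega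
    have hk : k < cs.length := by omega
    have hdropk : cs.drop k = cs[k] :: cs.drop (k + 1) := List.drop_eq_getElem_cons hk
    have hdropk1 : cs.drop (k + 1) = cs[k + 1] :: cs.drop (k + 2) := List.drop_eq_getElem_cons hk1
    have hgk : PySem.List.pyGetD cs (k : Int) ' ' = cs[k] := by
      rw [PySem.List.pyGetD_natCast]; simp [List.getD, hk]
    have hgk1 : PySem.List.pyGetD cs ((k : Int) + 1) ' ' = cs[k + 1] := by
      rw [show ((k : Int) + 1) = ((k + 1 : Nat) : Int) by push_cast; ring,
          PySem.List.pyGetD_natCast]; simp [List.getD, hk1]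
    -- the lookup types[k+1] in the current state
    have hlen : (typesRef (cs.drop (k + 1))).length = cs.length - (k + 1) := by
      rw [typesRef_length]; simp
    have hstate : PySem.List.pyGetD (List.replicate (k + 1) "" ++ typesRef (cs.drop (k + 1))) ((k : Int) + 1) ""
        = (typesRef (cs.drop (k + 1))).headD "" := by
      rw [show ((k : Int) + 1) = ((k + 1 : Nat) : Int) by push_cast; ring,
          PySem.List.pyGetD_natCast]
      have hne : typesRef (cs.drop (k + 1)) ≠ [] := by
        intro h; rw [h] at hlen; simp at hlen; omega
      obtain ⟨y, ys, hy⟩ := List.exists_cons_of_ne_nil hne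
      simp [hy, List.getD]
    have hset : ∀ v : String,
        (List.replicate (k + 1) "" ++ typesRef (cs.drop (k + 1))).set ((k : Int)).toNat v
          = List.replicate k "" ++ v :: typesRef (cs.drop (k + 1)) := by
      intro v; rw [show ((k : Int)).toNat = k by simp, set_replicate_append]
    have htr : typesRef (cs.drop k)
        = (if cs[k] > cs[k + 1] then "L" else if cs[k] < cs[k + 1] then "S"
           else (typesRef (cs.drop (k + 1))).headD "") :: typesRef (cs.drop (k + 1)) := by
      rw [hdropk, hdropk1, typesRef, ← hdropk1]
    rw [hgk, hgk1]
    split_ifs with h1 h2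
    · rw [hset]; rw [← ih (by omega)]; congr 1; rw [htr]; simp [h1]
    · rw [hset]; rw [← ih (by omega)]; congr 1; rw [htr]; simp [h1, h2]
    · rw [hstate, hset]; rw [← ih (by omega)]; congr 1; rw [htr]; simp [h1, h2]

lemma portA_eq_ref (s : String) : classify_types_py s = typesRef s.toList := by
  unfold classify_types_py
  generalize s.toList = cs
  rcases eq_or_ne cs [] with h | h
  · subst h
    rw [show ((List.length ([] : List Char) : Int) - 2) = -2 by simp]
    rw [PySem.List.pyRange_neg_one_eq_nil (by norm_num)]
    simp [typesRef]
  · obtain ⟨m, hm⟩ : ∃ m, cs.length = m + 1 := ⟨cs.length - 1, by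
      have := List.length_pos_of_ne_nil h; omega⟩
    have hd : cs.drop m = [cs[m]'(by omega)] := by
      rw [List.drop_eq_getElem_cons (by omega)]
      simp [show m + 1 = cs.length by omega]
    have hinit : (List.replicate cs.length "").set (cs.length - 1) "S"
        = List.replicate m "" ++ typesRef (cs.drop m) := by
      rw [hd, typesRef, hm, Nat.add_sub_cancel]
      simpa using set_replicate_append "" "S" m []
    rw [hinit, show (cs.length : Int) - 2 = (m : Int) - 1 by omega]
    exact loopA_inv cs m (by omega)

-- the type of a run given what follows it
def tOf (c : Char) : List Char → String
  | [] => "S"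
  | d :: _ => if c < d then "S" else "L"

lemma typesRef_run (c : Char) :
    ∀ (run rest' : List Char), (∀ x ∈ run, x = c) → (∀ d ∈ rest'.head?, d ≠ c) →
    typesRef (c :: (run ++ rest')) = List.replicate (run.length + 1) (tOf c rest') ++ typesRef rest' := by
  intro run
  induction run with
  | nil =>
    intro rest' _ hhd
    cases rest' with
    | nil => simp [typesRef, tOf]
    | cons d t =>
      have hdc : d ≠ c := hhd d (by simp)
      rw [show c :: ([] ++ d :: t) = c :: d :: t by simp, typesRef]
      simp only [tOf]
      have : (if c > d then "L" else if c < d then "S" else (typesRef (d :: t)).headD "")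
          = (if c < d then "S" else "L") := by
        rcases lt_trichotomy c d with h | h | h
        · simp [h, asymm h]
        · exact absurd h.symm hdc
        · simp [h, asymm h]
      rw [this]; rfl
  | cons c2 run2 ih =>
    intro rest' hrun hhd
    have hc2 : c2 = c := hrun c2 (by simp)
    subst hc2
    have ih' := ih rest' (fun x hx => hrun x (by simp [hx])) hhd
    rw [show c2 :: ((c2 :: run2) ++ rest') = c2 :: c2 :: (run2 ++ rest') by simp, typesRef, ih']
    simp [List.replicate_succ]

lemma portB_eq_ref : ∀ cs : List Char, classifyB_go cs = typesRef cs := by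
  intro cs
  induction cs using classifyB_go.induct with
  | case1 => simp [classifyB_go, typesRef]
  | case2 c rest r ih =>
    rw [classifyB_go, ih]
    have hsplit : rest = rest.takeWhile (· == c) ++ rest.dropWhile (· == c) :=
      (List.takeWhile_append_dropWhile).symm
    have hrun : ∀ x ∈ rest.takeWhile (· == c), x = c := by
      intro x hx
      simpa using List.mem_takeWhile_imp hx
    have hhd : ∀ d ∈ (rest.dropWhile (· == c)).head?, d ≠ c := by
      intro d hd
      have := List.head?_dropWhile_not (p := (· == c)) (l := rest)
      rw [hd] at this
      simpa using this
    have := typesRef_run c (rest.takeWhile (· == c)) (rest.dropWhile (· == c)) hrun hhd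
    rw [← hsplit] at this
    rw [this, show r = rest.dropWhile (· == c) from rfl]
    cases h : rest.dropWhile (· == c) <;> simp [tOf]

-- ===== VERDICT (by name: the statement is the Claim_ definition above) =====
theorem classify_types_py_spec : Claim_equal_classify_types_py := by
  intro s _ _
  unfold Spec_classify_types_py classify_types_py_alt
  rw [portA_eq_ref, portB_eq_ref]
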